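-- pv_equiv track=rewrite | github.com/jacob-macleod/Issue-Tracker | main.py | remove_first_and_last_characters
-- ===== SOURCE A (Python) =====
-- def remove_first_and_last_characters (string) :
--         #Remove the first and last characters (') of string - convert it to an array first
--         string = list(string)
--         string_stripped = ""
--
--         #Reconstruct the array back into a string, not using the first and last characters
--         for i in range (0, len(string)) :
--             if i == 0 or i == len(string)-1 :
--                 pass
--             else :
--                 string_stripped = string_stripped + string[i]
--
--         return string_stripped
-- ===== SOURCE B (Python) =====
-- def remove_first_and_last_characters(string):
--     # Closed form: everything except the first and last element, rejoined.
--     return "".join(list(string)[1:-1])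
-- ===== Notes on version B (the rewrite author's own statement) =====
-- stated objective: simpler
-- what changed: Replaces the index loop with its 0/len-1 endpoint guard and repeated string concatenation by a single closed-form slice [1:-1] joined back into a string.
import Mathlib
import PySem

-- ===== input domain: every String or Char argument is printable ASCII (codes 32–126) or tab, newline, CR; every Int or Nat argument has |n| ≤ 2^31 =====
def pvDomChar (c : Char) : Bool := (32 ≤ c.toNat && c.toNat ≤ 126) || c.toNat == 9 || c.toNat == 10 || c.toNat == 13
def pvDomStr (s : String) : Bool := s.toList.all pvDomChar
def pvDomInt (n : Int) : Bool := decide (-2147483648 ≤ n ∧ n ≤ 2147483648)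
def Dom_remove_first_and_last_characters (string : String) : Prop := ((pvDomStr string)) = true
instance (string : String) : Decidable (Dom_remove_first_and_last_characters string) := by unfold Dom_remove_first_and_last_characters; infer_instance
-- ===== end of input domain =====

-- B replaces A's index loop (with its i==0 / i==len-1 endpoint guard and repeated concatenation) by the closed-form slice [1:-1] rejoined; objective: simpler.

-- ===== PORT A =====
-- literal port of A: walk indices 0..len-1, skip the two endpoints, append each kept character
-- (index i is always in range here, so pyGetD with a dummy default is exact)
def remove_first_and_last_characters (string : String) : String :=
  let cs := string.toList
  let string_stripped : List Char :=
    (PySem.List.pyRange 0 (cs.length : Int) 1).foldl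
      (fun acc i =>
        if i = 0 ∨ i = (cs.length : Int) - 1 then acc
        else acc ++ [PySem.List.pyGetD cs i ' ']) []
  String.mk string_stripped

-- ===== PORT B =====
-- port of B: ''.join(list(string)[1:-1])
def remove_first_and_last_characters_alt (string : String) : String :=
  String.mk (PySem.List.slice string.toList (some 1) (some (-1)))

-- ===== PRECONDITION & SPEC =====
def Spec_remove_first_and_last_characters (string : String) (out : String) : Prop := out = remove_first_and_last_characters_alt string
instance (string : String) (out : String) : Decidable (Spec_remove_first_and_last_characters string out) := by unfold Spec_remove_first_and_last_characters; infer_instance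

-- ===== CLAIM (what is proved, stated in full; the proofs are below) =====
def Claim_equal_remove_first_and_last_characters : Prop := ∀ (string : String), Dom_remove_first_and_last_characters string → Spec_remove_first_and_last_characters string (remove_first_and_last_characters string)

-- ===== LEMMAS AND PROOFS =====

-- B side: the slice [1:-1] is tail-then-dropLast
theorem slice_one_neg_one {α : Type} (xs : List α) :
    PySem.List.slice xs (some 1) (some (-1)) = xs.tail.dropLast := by
  simp only [PySem.List.slice, PySem.List.clampIdx]
  rcases xs with _ | ⟨a, t⟩
  · simp
  · simp [List.dropLast_eq_take]
    rw [if_neg (by omega : ¬((t.length : Int) < 0))]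
    omega

-- loop invariant for A: after the first m steps (m < len) the accumulator is (take m).tail
theorem foldA_take {α : Type} (cs : List α) (d : α) (m : Nat) (hm : m + 1 ≤ cs.length) :
    (PySem.List.pyRange 0 (m : Int) 1).foldl
      (fun acc i =>
        if i = 0 ∨ i = (cs.length : Int) - 1 then acc
        else acc ++ [PySem.List.pyGetD cs i d]) [] = (cs.take m).tail := by
  induction m with
  | zero => simp [PySem.List.pyRange_one_eq_nil]
  | succ m ih =>
    have h0 : ((m + 1 : Nat) : Int) = (m : Int) + 1 := by push_cast; ring
    rw [h0, PySem.List.pyRange_one_succ_right (by omega), List.foldl_append,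
        ih (by omega)]
    simp only [List.foldl_cons, List.foldl_nil]
    by_cases hm0 : m = 0
    · subst hm0
      rcases cs with _ | ⟨a, t⟩
      · simp at hm
      · simp
    · rw [if_neg (by omega), PySem.List.pyGetD_ofNat cs m d (by omega),
          List.take_add_one, List.getElem?_eq_getElem (by omega)]
      simp only [Option.toList_some]
      rw [List.tail_append_of_ne_nil]
      simp [List.ne_nil_iff_length_pos]
      omega

-- A's full loop produces exactly the middle of the list
theorem fold_eq_middle {α : Type} (cs : List α) (d : α) :
    (PySem.List.pyRange 0 (cs.length : Int) 1).foldl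
      (fun acc i =>
        if i = 0 ∨ i = (cs.length : Int) - 1 then acc
        else acc ++ [PySem.List.pyGetD cs i d]) [] = cs.tail.dropLast := by
  by_cases hcs : cs = []
  · subst hcs; simp [PySem.List.pyRange_one_eq_nil]
  · have hlen : 1 ≤ cs.length := by
      rcases cs with _ | _ <;> simp_all
    have hsplit : PySem.List.pyRange 0 ((cs.length : Int)) 1 =
        PySem.List.pyRange 0 ((cs.length - 1 : Nat) : Int) 1 ++ [((cs.length - 1 : Nat) : Int)] := by
      rw [show ((cs.length : Int)) = ((cs.length - 1 : Nat) : Int) + 1 by omega]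
      exact PySem.List.pyRange_one_succ_right (by omega)
    rw [hsplit, List.foldl_append, foldA_take cs d (cs.length - 1) (by omega)]
    simp only [List.foldl_cons, List.foldl_nil]
    rw [if_pos (by omega)]
    rw [List.dropLast_eq_take, List.length_tail, List.drop_one.symm,
        List.drop_one.symm, List.drop_take]

-- ===== VERDICT (by name: the statement is the Claim_ definition above) =====
theorem remove_first_and_last_characters_spec : Claim_equal_remove_first_and_last_characters := by
  intro s _
  unfold Spec_remove_first_and_last_characters remove_first_and_last_characters remove_first_and_last_characters_alt
  simp only [slice_one_neg_one]
  exact congrArg String.mk (fold_eq_middle s.toList ' ')
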